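-- pv_equiv track=rewrite | github.com/ThuraAung1601/python_practice | HW6/no2.py | calculate_first_day_of_month
-- ===== SOURCE A (Python) =====
-- months_31 = [1, 3, 5, 7, 8, 10, 12]
--
-- def calculate_first_day_of_month(month) :
--     month = month -1
--     first_day_of_month = 0
--     for i in range(1, 13) :
--         if i in months_31 :
--             for k in range(0, 31):
--                 first_day_of_month += 1
--                 if first_day_of_month > 7 :
--                     first_day_of_month = 1
--         elif i == 2 :
--             for k in range(0, 28):
--                 first_day_of_month += 1
--                 if first_day_of_month > 7 :
--                     first_day_of_month = 1
--         else :
--             for k in range(0, 30):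
--                 first_day_of_month += 1
--                 if first_day_of_month > 7 :
--                     first_day_of_month = 1
--         if month == i :
--             return first_day_of_month
-- ===== SOURCE B (Python) =====
-- _CUM = [0, 31, 59, 90, 120, 151, 181, 212, 243, 273, 304, 334, 365]
--
-- def calculate_first_day_of_month(month):
--     if 2 <= month <= 13:
--         return (_CUM[month - 1] - 1) % 7 + 1
--     return None
-- ===== Notes on version B (the rewrite author's own statement) =====
-- stated objective: simpler
-- what changed: Replaces A's per-month day-by-day increment-and-wrap simulation loops with a precomputed cumulative-days table and one modular-arithmetic formula, no loops at all.
import Mathlib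
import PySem

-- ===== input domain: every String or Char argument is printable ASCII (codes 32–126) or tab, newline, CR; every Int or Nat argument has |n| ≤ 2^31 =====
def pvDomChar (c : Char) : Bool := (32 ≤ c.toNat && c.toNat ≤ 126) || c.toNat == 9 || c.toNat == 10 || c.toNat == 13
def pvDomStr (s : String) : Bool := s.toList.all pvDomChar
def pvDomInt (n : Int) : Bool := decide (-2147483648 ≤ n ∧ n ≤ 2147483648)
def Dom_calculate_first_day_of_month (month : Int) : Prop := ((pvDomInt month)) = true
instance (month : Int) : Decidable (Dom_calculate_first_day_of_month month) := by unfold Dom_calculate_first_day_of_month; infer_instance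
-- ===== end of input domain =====

set_option maxRecDepth 4096


-- Header: B replaces A's day-by-day wrap simulation with a cumulative-days table and a modular-arithmetic formula (objective: simpler); return-value equivalence, no mutation involved.

-- ===== PORT A =====
-- one pass of "first_day_of_month += 1; if first_day_of_month > 7: first_day_of_month = 1"
def pvStepA (x : Int) : Int :=
  let y := x + 1
  if y > 7 then 1 else y

-- "for k in range(0, n): ..."
def pvSimA (n : Int) (f : Int) : Int :=
  (PySem.List.pyRange 0 n 1).foldl (fun x _ => pvStepA x) f

def months_31 : List Int := [1, 3, 5, 7, 8, 10, 12]

-- the "for i in range(1, 13)" loop with its early return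
def pvLoopA : List Int → Int → Int → Option Int
  | [], _, _ => none
  | i :: rest, month, f =>
    let f :=
      if months_31.contains i then pvSimA 31 f
      else if i == 2 then pvSimA 28 f
      else pvSimA 30 f
    if month == i then some f else pvLoopA rest month f

def calculate_first_day_of_month (month : Int) : Option Int :=
  pvLoopA (PySem.List.pyRange 1 13 1) (month - 1) 0

-- ===== PORT B =====
def pvCUM : List Int := [0, 31, 59, 90, 120, 151, 181, 212, 243, 273, 304, 334, 365]

def calculate_first_day_of_month_alt (month : Int) : Option Int :=
  if 2 ≤ month ∧ month ≤ 13 then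
    (PySem.List.pyGet? pvCUM (month - 1)).map (fun v => PySem.Int.mod (v - 1) 7 + 1)
  else
    none

-- ===== PRECONDITION & SPEC =====
def Spec_calculate_first_day_of_month (month : Int) (out : Option Int) : Prop := out = calculate_first_day_of_month_alt month
instance (month : Int) (out : Option Int) : Decidable (Spec_calculate_first_day_of_month month out) := by unfold Spec_calculate_first_day_of_month; infer_instance

-- ===== CLAIM (what is proved, stated in full; the proofs are below) =====
def Claim_equal_calculate_first_day_of_month : Prop := ∀ (month : Int), Dom_calculate_first_day_of_month month → Spec_calculate_first_day_of_month month (calculate_first_day_of_month month)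

-- ===== LEMMAS AND PROOFS =====
lemma pvLoopA_none (l : List Int) (m : Int) (h : ∀ i ∈ l, m ≠ i) :
    ∀ f, pvLoopA l m f = none := by
  induction l with
  | nil => intro f; rfl
  | cons i rest ih =>
    intro f
    have hne : m ≠ i := h i (by simp)
    simp only [pvLoopA]
    rw [if_neg (by simpa using hne)]
    exact ih (fun j hj => h j (by simp [hj])) _

lemma pvRange12 : PySem.List.pyRange 1 13 1 = [1,2,3,4,5,6,7,8,9,10,11,12] := by decide

-- ===== VERDICT (by name: the statement is the Claim_ definition above) =====
theorem calculate_first_day_of_month_spec : Claim_equal_calculate_first_day_of_month := by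
  intro month _
  unfold Spec_calculate_first_day_of_month
  by_cases h : 2 ≤ month ∧ month ≤ 13
  · obtain ⟨h1, h2⟩ := h
    interval_cases month <;> decide
  · have hB : calculate_first_day_of_month_alt month = none := by
      unfold calculate_first_day_of_month_alt
      rw [if_neg h]
    have hA : calculate_first_day_of_month month = none := by
      unfold calculate_first_day_of_month
      rw [pvRange12]
      exact pvLoopA_none _ _ (by intro i hi; fin_cases hi <;> omega) _
    rw [hA, hB]
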